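-- pv_equiv track=rewrite | github.com/kyos1704/AtCoder-Python | ABC/141/b.py | solve
-- ===== SOURCE A (Python) =====
-- a = ['R', 'U', 'D']
--
-- b = ['L', 'U', 'D']
--
-- def solve(s):
--     for i in range(len(s)):
--         if i % 2 == 0:
--             if (s[i] not in a):
--                 return False
--         else:
--             if (s[i] not in b):
--                 return False
--     return True
-- ===== SOURCE B (Python) =====
-- def solve(s):
--     return set(s[::2]).issubset('RUD') and set(s[1::2]).issubset('LUD')
-- ===== Notes on version B (the rewrite author's own statement) =====
-- stated objective: simpler
-- what changed: Replaced A's indexed loop with per-position parity branching and early return by a loopless set formulation: build the set of characters occurring at even positions (slice s[::2]) and at odd positions (s[1::2]) and test set inclusion in {R,U,D} resp. {L,U,D}.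
import Mathlib
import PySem

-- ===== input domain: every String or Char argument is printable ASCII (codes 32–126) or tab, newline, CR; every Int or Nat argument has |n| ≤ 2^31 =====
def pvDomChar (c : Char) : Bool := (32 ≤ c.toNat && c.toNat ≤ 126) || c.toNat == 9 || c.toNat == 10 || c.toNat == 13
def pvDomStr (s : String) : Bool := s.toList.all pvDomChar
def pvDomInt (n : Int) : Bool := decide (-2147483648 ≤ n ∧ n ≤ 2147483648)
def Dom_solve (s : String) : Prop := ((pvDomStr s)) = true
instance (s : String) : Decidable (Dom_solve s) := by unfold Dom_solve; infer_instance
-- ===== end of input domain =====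

-- B replaces A's per-index loop with early return by two set-subset tests:
-- the set of characters at even positions must be ⊆ {R,U,D} and at odd positions ⊆ {L,U,D} (simpler).

-- ===== PORT A =====
-- a = ['R', 'U', 'D']
def aConst : List Char := ['R', 'U', 'D']
-- b = ['L', 'U', 'D']
def bConst : List Char := ['L', 'U', 'D']

-- the 'for i in range(len(s))' loop with its early returns; s[i] is always in range here
def solveGo (cs : List Char) : List Nat → Bool
  | [] => true
  | i :: rest =>
      if i % 2 == 0 then
        if !(aConst.contains (cs.getD i ' ')) then false
        else solveGo cs rest
      else
        if !(bConst.contains (cs.getD i ' ')) then false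
        else solveGo cs rest

def solve (s : String) : Bool :=
  solveGo s.toList (List.range s.toList.length)

-- ===== PORT B =====
-- Source B: return set(s[::2]).issubset('RUD') and set(s[1::2]).issubset('LUD')
-- s[::2] and s[1::2] are PySem.List.slice? with step 2 (step ≠ 0, so never none;
-- the 'false' arm is unreachable and only makes the match total)
def solve_alt (s : String) : Bool :=
  match PySem.List.slice? s.toList none none 2, PySem.List.slice? s.toList (some 1) none 2 with
  | some ev, some od =>
      PySem.Set.issubset (PySem.Set.ofList ev) (['R','U','D'] : List Char) &&
      PySem.Set.issubset (PySem.Set.ofList od) (['L','U','D'] : List Char)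
  | _, _ => false

-- ===== PRECONDITION & SPEC =====
def Spec_solve (s : String) (out : Bool) : Prop := out = solve_alt s
instance (s : String) (out : Bool) : Decidable (Spec_solve s out) := by unfold Spec_solve; infer_instance

-- ===== CLAIM (what is proved, stated in full; the proofs are below) =====
def Claim_equal_solve : Prop := ∀ (s : String), Dom_solve s → Spec_solve s (solve s)

-- ===== LEMMAS AND PROOFS =====

-- A's loop returns true iff every listed index satisfies its parity's membership test
lemma solveGo_iff (cs : List Char) (l : List Nat) :
    solveGo cs l = true ↔
      ∀ i ∈ l, (if i % 2 = 0 then cs[i]?.getD ' ' ∈ aConst else cs[i]?.getD ' ' ∈ bConst) := by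
  induction l with
  | nil => simp [solveGo]
  | cons i rest ih =>
      by_cases hp : i % 2 = 0
      · by_cases ha : cs[i]?.getD ' ' ∈ aConst
        · simp [solveGo, hp, ha, ih]
        · simp [solveGo, hp, ha]
      · by_cases hb : cs[i]?.getD ' ' ∈ bConst
        · simp [solveGo, hp, hb, ih]
        · simp [solveGo, hp, hb]

-- the even-position slice s[::2]
lemma slice_even (cs : List Char) :
    PySem.List.slice? cs none none 2 =
      some (List.filterMap (fun k : Nat => cs[((0:Int) + 2 * (k:Int)).toNat]?)
        (List.range (if (0:Int) < (cs.length:Int) then (((cs.length:Int) - 0 + 2 - 1) / 2).toNat else 0))) := by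
  simp [PySem.List.slice?, PySem.List.sliceIndices]

-- the odd-position slice s[1::2]
lemma slice_odd (cs : List Char) :
    PySem.List.slice? cs (some 1) none 2 =
      some (List.filterMap (fun k : Nat => cs[(min 1 (cs.length:Int) + 2 * (k:Int)).toNat]?)
        (List.range (if min 1 (cs.length:Int) < (cs.length:Int) then
          (((cs.length:Int) - min 1 (cs.length:Int) + 2 - 1) / 2).toNat else 0))) := by
  simp [PySem.List.slice?, PySem.List.sliceIndices]

-- membership in the even slice = occurring at some even position
lemma mem_even_slice (cs : List Char) (c : Char) :
    (c ∈ List.filterMap (fun k : Nat => cs[((0:Int) + 2 * (k:Int)).toNat]?)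
        (List.range (if (0:Int) < (cs.length:Int) then (((cs.length:Int) - 0 + 2 - 1) / 2).toNat else 0))) ↔
      ∃ i : Nat, i % 2 = 0 ∧ cs[i]? = some c := by
  simp only [List.mem_filterMap, List.mem_range]
  constructor
  · rintro ⟨k, hk, hsome⟩
    refine ⟨2 * k, by omega, ?_⟩
    have he : ((0:Int) + 2 * (k:Int)).toNat = 2 * k := by omega
    rwa [he] at hsome
  · rintro ⟨i, hpar, hsome⟩
    have hi : i < cs.length := (List.getElem?_eq_some_iff.mp hsome).1
    refine ⟨i / 2, ?_, ?_⟩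
    · split <;> omega
    · have he : ((0:Int) + 2 * ((i / 2 : Nat):Int)).toNat = i := by omega
      rwa [he]

-- membership in the odd slice = occurring at some odd position
lemma mem_odd_slice (cs : List Char) (c : Char) :
    (c ∈ List.filterMap (fun k : Nat => cs[(min 1 (cs.length:Int) + 2 * (k:Int)).toNat]?)
        (List.range (if min 1 (cs.length:Int) < (cs.length:Int) then
          (((cs.length:Int) - min 1 (cs.length:Int) + 2 - 1) / 2).toNat else 0))) ↔
      ∃ i : Nat, i % 2 = 1 ∧ cs[i]? = some c := by
  simp only [List.mem_filterMap, List.mem_range]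
  by_cases h0 : cs.length = 0
  · constructor
    · rintro ⟨k, hk, -⟩
      rw [show min 1 ((cs.length:Int)) = 0 by omega,
          if_neg (by omega : ¬ ((0:Int) < (cs.length:Int)))] at hk
      omega
    · rintro ⟨i, -, hsome⟩
      have := (List.getElem?_eq_some_iff.mp hsome).1
      omega
  · have hmin : min 1 ((cs.length:Int)) = 1 := by omega
    rw [hmin]
    constructor
    · rintro ⟨k, hk, hsome⟩
      refine ⟨1 + 2 * k, by omega, ?_⟩
      have he : ((1:Int) + 2 * (k:Int)).toNat = 1 + 2 * k := by omega
      rwa [he] at hsome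
    · rintro ⟨i, hpar, hsome⟩
      have hi : i < cs.length := (List.getElem?_eq_some_iff.mp hsome).1
      refine ⟨i / 2, ?_, ?_⟩
      · split <;> omega
      · have he : ((1:Int) + 2 * ((i / 2 : Nat):Int)).toNat = i := by omega
        rwa [he]

-- B returns true iff every index satisfies its parity's membership test
lemma solve_alt_iff (cs : List Char) :
    (match PySem.List.slice? cs none none 2, PySem.List.slice? cs (some 1) none 2 with
      | some ev, some od =>
          PySem.Set.issubset (PySem.Set.ofList ev) (['R','U','D'] : List Char) &&
          PySem.Set.issubset (PySem.Set.ofList od) (['L','U','D'] : List Char)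
      | _, _ => false) = true ↔
      ∀ i < cs.length, (if i % 2 = 0 then cs[i]?.getD ' ' ∈ aConst else cs[i]?.getD ' ' ∈ bConst) := by
  rw [slice_even, slice_odd]
  simp only [Bool.and_eq_true, PySem.Set.issubset_iff, PySem.Set.mem_ofList]
  constructor
  · rintro ⟨hev, hod⟩ i hi
    have hsome : cs[i]? = some cs[i] := List.getElem?_eq_getElem hi
    by_cases hp : i % 2 = 0
    · simp only [hp, if_true]
      have := hev cs[i] ((mem_even_slice cs _).mpr ⟨i, hp, hsome⟩)
      rw [hsome]
      simpa [aConst] using this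
    · simp only [hp, if_false]
      have := hod cs[i] ((mem_odd_slice cs _).mpr ⟨i, by omega, hsome⟩)
      rw [hsome]
      simpa [bConst] using this
  · intro h
    constructor
    · intro c hc
      obtain ⟨i, hpar, hsome⟩ := (mem_even_slice cs c).mp hc
      have hi : i < cs.length := (List.getElem?_eq_some_iff.mp hsome).1
      have := h i hi
      simp only [hpar, if_true] at this
      rw [hsome] at this
      simpa [aConst] using this
    · intro c hc
      obtain ⟨i, hpar, hsome⟩ := (mem_odd_slice cs c).mp hc
      have hi : i < cs.length := (List.getElem?_eq_some_iff.mp hsome).1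
      have := h i hi
      simp only [show ¬ i % 2 = 0 by omega, if_false] at this
      rw [hsome] at this
      simpa [bConst] using this

-- ===== VERDICT (by name: the statement is the Claim_ definition above) =====
theorem solve_spec : Claim_equal_solve := by
  intro s _
  unfold Spec_solve
  rw [← Bool.coe_iff_coe]
  unfold solve solve_alt
  rw [solveGo_iff, solve_alt_iff]
  constructor
  · intro h i hi
    exact h i (List.mem_range.mpr hi)
  · intro h i hi
    exact h i (List.mem_range.mp hi)
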